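-- pv_equiv track=rewrite | github.com/jeni-ma/my-project | 42.py | can_stack
-- ===== SOURCE A (Python) =====
-- from collections import deque
--
-- def can_stack(cubes):
--     d = deque(cubes)
--     last_picked = float('inf')
--
--     while d:
--         # Pick the larger of the two ends
--         if d[0] >= d[-1]:
--             current = d.popleft()
--         else:
--             current = d.pop()
--         if current > last_picked:
--             return "No"
--         last_picked = current
--     return "Yes"
-- ===== SOURCE B (Python) =====
-- def can_stack(cubes):
--     xs = list(cubes)
--     ascending = False
--     for i in range(1, len(xs)):
--         if ascending:
--             if xs[i] < xs[i - 1]: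
--                 return "No"
--         else:
--             if xs[i] > xs[i - 1]:
--                 ascending = True
--     return "Yes"
-- ===== Notes on version B (the rewrite author's own statement) =====
-- stated objective: simpler
-- what changed: Replaced the deque-based greedy end-picking loop by a single forward scan that checks the list is non-increasing then non-decreasing (a valley), tracking one phase flag.
import Mathlib
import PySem

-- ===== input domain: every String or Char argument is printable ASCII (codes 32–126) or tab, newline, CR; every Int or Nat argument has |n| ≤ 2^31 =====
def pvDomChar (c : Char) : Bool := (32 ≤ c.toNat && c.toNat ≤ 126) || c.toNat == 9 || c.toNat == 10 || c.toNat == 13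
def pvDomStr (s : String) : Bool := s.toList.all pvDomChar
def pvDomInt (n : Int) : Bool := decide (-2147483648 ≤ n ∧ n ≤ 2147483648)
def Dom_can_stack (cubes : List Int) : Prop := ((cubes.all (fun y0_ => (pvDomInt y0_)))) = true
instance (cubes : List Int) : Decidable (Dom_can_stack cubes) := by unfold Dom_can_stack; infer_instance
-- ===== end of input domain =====

-- B replaces A's deque greedy end-picking by a one-pass valley (non-increasing then
-- non-decreasing) scan with a phase flag: simpler, same O(n) cost.

-- ===== PORT A =====
-- d[-1] of the nonempty deque x :: xs (hand-ported: last element, default the head)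
def lastD : List Int → Int → Int
  | [], d => d
  | x :: t, _ => lastD t x

-- A's loop: deque as a list (popleft = drop head, pop = dropLast); lastPicked = none
-- models the initial float('inf'), so the 'current > last_picked' test is false then.
def canStackGo (d : List Int) (lastPicked : Option Int) : String :=
  match d with
  | [] => "Yes"
  | x :: xs =>
    if lastD xs x ≤ x then          -- d[0] >= d[-1] : current = popleft()
      if (match lastPicked with | none => false | some m => m < x) then "No"
      else canStackGo xs (some x)
    else                             -- current = pop()
      if (match lastPicked with | none => false | some m => m < lastD xs x) then "No"
      else canStackGo ((x :: xs).dropLast) (some (lastD xs x))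
termination_by d.length
decreasing_by all_goals simp

def can_stack (cubes : List Int) : String := canStackGo cubes none

-- ===== PORT B =====
-- forward scan: prev = xs[i-1], asc = the phase flag 'ascending'
def canStackAltGo (t : List Int) (prev : Int) (asc : Bool) : String :=
  match t with
  | [] => "Yes"
  | x :: rest =>
    if asc then
      if x < prev then "No" else canStackAltGo rest x asc
    else
      if prev < x then canStackAltGo rest x true else canStackAltGo rest x false

def can_stack_alt (cubes : List Int) : String :=
  match cubes with
  | [] => "Yes"
  | x :: t => canStackAltGo t x false

-- ===== PRECONDITION & SPEC =====
def Spec_can_stack (cubes : List Int) (out : String) : Prop := out = can_stack_alt cubes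
instance (cubes : List Int) (out : String) : Decidable (Spec_can_stack cubes out) := by unfold Spec_can_stack; infer_instance

-- ===== CLAIM (what is proved, stated in full; the proofs are below) =====
def Claim_equal_can_stack : Prop := ∀ (cubes : List Int), Dom_can_stack cubes → Spec_can_stack cubes (can_stack cubes)

-- ===== LEMMAS AND PROOFS =====

-- non-decreasing
def ascB : List Int → Bool
  | [] => true
  | [_] => true
  | a :: b :: t => decide (a ≤ b) && ascB (b :: t)

-- non-increasing then non-decreasing
def valleyB : List Int → Bool
  | [] => true
  | [_] => true
  | a :: b :: t => if b ≤ a then valleyB (b :: t) else ascB (a :: b :: t)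

-- the bound check A applies (none = float('inf'))
def boundB : Option Int → Int → Bool
  | none, _ => true
  | some m, v => decide (v ≤ m)

def aOk : List Int → Option Int → Bool
  | [], _ => true
  | x :: xs, m => boundB m x && boundB m (lastD xs x) && valleyB (x :: xs)

theorem dropLast_lastD : ∀ (t : List Int) (b : Int),
    (b :: t).dropLast ++ [lastD t b] = b :: t := by
  intro t
  induction t with
  | nil => intro b; simp [lastD]
  | cons c u ih =>
    intro b
    simp only [List.dropLast_cons₂, List.cons_append, lastD]
    rw [ih c]

theorem ascB_le_last : ∀ (t : List Int) (a : Int), ascB (a :: t) = true → a ≤ lastD t a := by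
  intro t
  induction t with
  | nil => intro a _; simp [lastD]
  | cons b t' ih =>
    intro a h
    simp only [ascB, Bool.and_eq_true, decide_eq_true_eq] at h
    have := ih b h.2
    simp only [lastD]
    omega

theorem ascB_snoc : ∀ (l : List Int) (a z : Int),
    ascB (a :: (l ++ [z])) = (ascB (a :: l) && decide (lastD l a ≤ z)) := by
  intro l
  induction l with
  | nil => intro a z; simp [ascB, lastD]
  | cons b t ih =>
    intro a z
    simp only [List.cons_append, ascB, ih b z, lastD, Bool.and_assoc]
    rfl

theorem valleyB_snoc : ∀ (l : List Int) (a z : Int), a < z →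
    valleyB (a :: (l ++ [z])) = (valleyB (a :: l) && decide (lastD l a ≤ z)) := by
  intro l
  induction l with
  | nil =>
    intro a z haz
    simp only [List.nil_append, valleyB, lastD]
    rw [if_neg (by omega : ¬ z ≤ a)]
    simp [ascB]
  | cons b t ih =>
    intro a z haz
    simp only [List.cons_append, valleyB, lastD]
    by_cases hba : b ≤ a
    · rw [if_pos hba, if_pos hba, ih b z (lt_of_le_of_lt hba haz)]
      rfl
    · rw [if_neg hba, if_neg hba]
      have := ascB_snoc (b :: t) a z
      simp only [List.cons_append, lastD] at this
      exact this

theorem valleyB_cons_of_last_le : ∀ (b : Int) (t : List Int) (x : Int),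
    lastD t b ≤ x → valleyB (x :: b :: t) = (decide (b ≤ x) && valleyB (b :: t)) := by
  intro b t x hlast
  simp only [valleyB]
  by_cases hbx : b ≤ x
  · simp [hbx]
  · rw [if_neg hbx, decide_eq_false hbx, Bool.false_and]
    by_cases hasc : ascB (x :: b :: t) = true
    · exfalso
      simp only [ascB, Bool.and_eq_true, decide_eq_true_eq] at hasc
      have := ascB_le_last t b hasc.2
      omega
    · simpa using hasc

-- A's loop returns "Yes" exactly when the remaining deque is a valley whose two ends
-- satisfy the bound.
theorem canStackGo_char : ∀ (d : List Int) (m : Option Int),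
    canStackGo d m = if aOk d m then "Yes" else "No" := by
  intro d m
  induction d, m using canStackGo.induct with
  | case1 m => simp [canStackGo, aOk]
  | case2 m x xs h1 h2 =>
    rw [canStackGo.eq_def]
    dsimp only
    rw [if_pos h1, if_pos h2]
    obtain ⟨k, hk, hlt⟩ : ∃ k, m = some k ∧ k < x := by
      cases m with
      | none => simp at h2
      | some k => simp at h2; exact ⟨k, rfl, h2⟩
    subst hk
    simp [aOk, boundB, show ¬ (x ≤ k) by omega]
  | case3 m x xs h1 h2 ih =>
    rw [canStackGo.eq_def]
    dsimp only
    rw [if_pos h1, if_neg h2, ih]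
    have hmx : boundB m x = true := by
      cases m with
      | none => rfl
      | some k => simp at h2; simp [boundB]; omega
    cases xs with
    | nil =>
      have hx : aOk [x] m = true := by simp [aOk, valleyB, lastD, hmx]
      simp only [hx]
      simp [aOk]
    | cons b t =>
      have h1' : lastD t b ≤ x := h1
      have hml : boundB m (lastD t b) = true := by
        cases m with
        | none => rfl
        | some k => simp [boundB] at hmx ⊢; omega
      have hA : aOk (x :: b :: t) m = (decide (b ≤ x) && valleyB (b :: t)) := by
        show (boundB m x && boundB m (lastD t b) && valleyB (x :: b :: t)) = _
        rw [hmx, hml, valleyB_cons_of_last_le b t x h1']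
        simp
      have hB : aOk (b :: t) (some x) = (decide (b ≤ x) && valleyB (b :: t)) := by
        show (decide (b ≤ x) && decide (lastD t b ≤ x) && valleyB (b :: t)) = _
        rw [decide_eq_true h1']
        simp
      simp only [hA, hB]
  | case4 m x xs h1 h2 =>
    rw [canStackGo.eq_def]
    dsimp only
    rw [if_neg h1, if_pos h2]
    obtain ⟨k, hk, hlt⟩ : ∃ k, m = some k ∧ k < lastD xs x := by
      cases m with
      | none => simp at h2
      | some k => simp at h2; exact ⟨k, rfl, h2⟩
    subst hk
    simp [aOk, boundB, show ¬ (lastD xs x ≤ k) by omega]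
  | case5 m x xs h1 h2 ih =>
    rw [canStackGo.eq_def]
    dsimp only
    rw [if_neg h1, if_neg h2, ih]
    have hxL : x < lastD xs x := by omega
    have hml : boundB m (lastD xs x) = true := by
      cases m with
      | none => rfl
      | some k => simp at h2; simp [boundB]; omega
    have hmx : boundB m x = true := by
      cases m with
      | none => rfl
      | some k => simp [boundB] at hml ⊢; omega
    cases xs with
    | nil => simp [lastD] at hxL
    | cons b t =>
      have hxL' : x < lastD t b := hxL
      have hml' : boundB m (lastD t b) = true := hml
      have hA : aOk (x :: b :: t) m
          = (valleyB (x :: (b :: t).dropLast) && decide (lastD ((b :: t).dropLast) x ≤ lastD t b)) := by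
        show (boundB m x && boundB m (lastD t b) && valleyB (x :: b :: t)) = _
        rw [hmx, hml',
          show valleyB (x :: b :: t) = valleyB (x :: ((b :: t).dropLast ++ [lastD t b])) from by
            rw [dropLast_lastD],
          valleyB_snoc _ _ _ hxL']
        simp
      have hB : aOk ((x :: b :: t).dropLast) (some (lastD (b :: t) x))
          = (valleyB (x :: (b :: t).dropLast) && decide (lastD ((b :: t).dropLast) x ≤ lastD t b)) := by
        show (decide (x ≤ lastD t b) && decide (lastD ((b :: t).dropLast) x ≤ lastD t b)
                && valleyB (x :: (b :: t).dropLast)) = _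
        rw [decide_eq_true (by omega : x ≤ lastD t b)]
        cases valleyB (x :: (b :: t).dropLast) <;>
          cases decide (lastD ((b :: t).dropLast) x ≤ lastD t b) <;> simp
      simp only [hA, hB]

theorem canStackAltGo_asc : ∀ (t : List Int) (p : Int),
    canStackAltGo t p true = if ascB (p :: t) then "Yes" else "No" := by
  intro t
  induction t with
  | nil => intro p; simp [canStackAltGo, ascB]
  | cons x rest ih =>
    intro p
    rw [canStackAltGo]
    simp only [if_true]
    by_cases h : x < p
    · simp [h, ascB, show ¬ p ≤ x by omega]
    · simp only [if_neg h, ih x]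
      simp [ascB, show p ≤ x by omega]

theorem canStackAltGo_char : ∀ (t : List Int) (p : Int),
    canStackAltGo t p false = if valleyB (p :: t) then "Yes" else "No" := by
  intro t
  induction t with
  | nil => intro p; simp [canStackAltGo, valleyB]
  | cons x rest ih =>
    intro p
    rw [canStackAltGo]
    simp only [if_false, Bool.false_eq_true]
    by_cases h : p < x
    · rw [if_pos h, canStackAltGo_asc rest x]
      have : valleyB (p :: x :: rest) = ascB (p :: x :: rest) := by
        simp only [valleyB]; rw [if_neg (by omega : ¬ x ≤ p)]
      rw [this, show ascB (p :: x :: rest) = (decide (p ≤ x) && ascB (x :: rest)) from rfl,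
        decide_eq_true (by omega : p ≤ x), Bool.true_and]
    · rw [if_neg h, ih x]
      have : valleyB (p :: x :: rest) = valleyB (x :: rest) := by
        simp only [valleyB]; rw [if_pos (by omega : x ≤ p)]
      rw [this]

-- ===== VERDICT (by name: the statement is the Claim_ definition above) =====
theorem can_stack_spec : Claim_equal_can_stack := by
  intro cubes _
  cases cubes with
  | nil =>
    show canStackGo [] none = "Yes"
    rw [canStackGo.eq_def]
  | cons x t =>
    show canStackGo (x :: t) none = canStackAltGo t x false
    rw [canStackGo_char, canStackAltGo_char]
    simp [aOk, boundB]
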